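-- pv_equiv track=rewrite | github.com/Kane-Pan/automatic-utterance-transcript-labeler | scripts/cha_to_csv.py | clean_utterance
-- ===== SOURCE A (Python) =====
-- def clean_utterance(utterance: str) -> str:
--     i = 0
--     out = []
--
--     while i < len(utterance):
--         ch = utterance[i]
--
--         # Case 1: &=
--         if ch == "&" and i + 1 < len(utterance) and utterance[i+1] == "=":
--             # find next space (end of the tag)
--             j = utterance.find(" ", i)
--             if j == -1:
--                 j = len(utterance)
--             # substring after '=' up to the next space
--             tag = utterance[i+2:j]
--             out.append("[" + tag.upper() + "]")
--             i = j
--             continue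
--
--         # Case 2: &-
--         if ch == "&" and i + 1 < len(utterance) and utterance[i+1] == "-":
--             # skip the "&-"
--             i += 2
--             continue
--
--         # Default: copy character
--         out.append(ch)
--         i += 1
--
--     return "".join(out)
-- ===== SOURCE B (Python) =====
-- def clean_utterance(utterance: str) -> str:
--     def fix(tok: str) -> str:
--         k = tok.find("&=")
--         if k == -1:
--             return tok.replace("&-", "")
--         return tok[:k].replace("&-", "") + "[" + tok[k + 2:].upper() + "]"
--     return " ".join(fix(tok) for tok in utterance.split(" "))
-- ===== Notes on version B (the rewrite author's own statement) =====
-- stated objective: faster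
-- what changed: A's manual index-driven while-loop scanner (explicit cursor jumps, find-from-index) is replaced by split-on-space, a per-token rewrite via find/replace/upper, and a join.
import Mathlib
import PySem

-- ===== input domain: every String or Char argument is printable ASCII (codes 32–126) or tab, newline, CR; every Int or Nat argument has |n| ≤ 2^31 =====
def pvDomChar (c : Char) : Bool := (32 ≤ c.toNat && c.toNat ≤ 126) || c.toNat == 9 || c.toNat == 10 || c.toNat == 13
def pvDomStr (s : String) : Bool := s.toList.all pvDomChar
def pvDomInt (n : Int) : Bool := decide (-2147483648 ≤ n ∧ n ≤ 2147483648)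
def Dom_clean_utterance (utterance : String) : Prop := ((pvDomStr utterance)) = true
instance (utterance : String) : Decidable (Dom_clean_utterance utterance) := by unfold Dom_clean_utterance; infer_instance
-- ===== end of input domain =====

-- B replaces A's per-character index-driven while-loop scanner by split-on-space + per-token rewrite + join (measurably faster: C-level string ops instead of a Python-level loop); return values proved equal on all inputs of the domain.

-- ===== PORT A =====
-- A's while loop, step for step; `fuel` only makes the recursion structural
-- (the top call passes fuel = |cs|, which bounds the number of iterations since i grows each step).
def cleanLoopA (cs : List Char) (fuel : Nat) (i : Nat) (out : List (List Char)) : List (List Char) :=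
  match fuel with
  | 0 => out
  | fuel + 1 =>
    if hi : i < cs.length then
      let ch := cs[i]
      -- `cs[i+1]? = some '='` is exactly Python's `i + 1 < len(utterance) and utterance[i+1] == "="`
      if ch = '&' ∧ cs[i+1]? = some '=' then
        let jI : Int := PySem.Chars.findFrom cs [' '] (i : Int)
        let j : Nat := if jI = -1 then cs.length else jI.toNat
        let tag : List Char := PySem.List.slice cs (some ((i : Int) + 2)) (some (j : Int))
        cleanLoopA cs fuel j (out ++ [['['] ++ PySem.Chars.upper tag ++ [']']])
      else if ch = '&' ∧ cs[i+1]? = some '-' then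
        cleanLoopA cs fuel (i + 2) out
      else
        cleanLoopA cs fuel (i + 1) (out ++ [[ch]])
    else out

def clean_utterance (utterance : String) : String :=
  String.ofList (PySem.Chars.join [] (cleanLoopA utterance.toList utterance.toList.length 0 []))

-- ===== PORT B =====
-- B's per-token fixer: k = tok.find("&="); -1 → tok.replace("&-",""); else prefix.replace("&-","") + "[" + tok[k+2:].upper() + "]"
def fixTokB (tok : List Char) : List Char :=
  let k : Int := PySem.Chars.find tok ['&', '=']
  if k = -1 then
    PySem.Chars.replace tok ['&', '-'] []
  else
    PySem.Chars.replace (PySem.List.slice tok none (some k)) ['&', '-'] [] ++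
      ['['] ++ PySem.Chars.upper (PySem.List.slice tok (some (k + 2)) none) ++ [']']

def clean_utterance_alt (utterance : String) : String :=
  String.ofList (PySem.Chars.join [' '] ((PySem.Chars.splitOn utterance.toList [' ']).map fixTokB))

-- ===== PRECONDITION & SPEC =====
def Spec_clean_utterance (utterance : String) (out : String) : Prop := out = clean_utterance_alt utterance
instance (utterance : String) (out : String) : Decidable (Spec_clean_utterance utterance out) := by unfold Spec_clean_utterance; infer_instance

-- ===== CLAIM (what is proved, stated in full; the proofs are below) =====
def Claim_equal_clean_utterance : Prop := ∀ (utterance : String), Dom_clean_utterance utterance → Spec_clean_utterance utterance (clean_utterance utterance)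

-- ===== LEMMAS AND PROOFS =====

-- Recursive (suffix-level) description of A's scan: what the while loop produces from position i on.
def procA : List Char → List Char
  | [] => []
  | c :: rest =>
    if c = '&' ∧ rest.head? = some '=' then
      '[' :: (PySem.Chars.upper (rest.tail.takeWhile (· ≠ ' ')) ++
        ']' :: procA (rest.tail.dropWhile (· ≠ ' ')))
    else if c = '&' ∧ rest.head? = some '-' then
      procA rest.tail
    else
      c :: procA rest
  termination_by l => l.length
  decreasing_by
  · have h1 : (rest.tail.dropWhile (fun x => decide (x ≠ ' '))).length ≤ rest.tail.length :=
      List.length_dropWhile_le _ _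
    have h2 : rest.tail.length = rest.length - 1 := List.length_tail (l := rest)
    simp only [List.length_cons]; omega
  · have h2 : rest.tail.length = rest.length - 1 := List.length_tail (l := rest)
    simp only [List.length_cons]; omega
  · simp only [List.length_cons]; omega

-- A's scan restricted to a single (space-free) token.
def fixA : List Char → List Char
  | [] => []
  | c :: rest =>
    if c = '&' ∧ rest.head? = some '=' then
      '[' :: (PySem.Chars.upper rest.tail ++ [']'])
    else if c = '&' ∧ rest.head? = some '-' then
      fixA rest.tail
    else
      c :: fixA rest
  termination_by l => l.length
  decreasing_by
  · have h2 : rest.tail.length = rest.length - 1 := List.length_tail (l := rest)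
    simp only [List.length_cons]; omega
  · simp only [List.length_cons]; omega

-- Left-to-right non-overlapping removal of "&-" (what tok.replace("&-","") computes).
def pvRepHy : List Char → List Char
  | [] => []
  | c :: t => if c = '&' ∧ t.head? = some '-' then pvRepHy t.tail else c :: pvRepHy t
  termination_by l => l.length
  decreasing_by
  · have h2 : t.tail.length = t.length - 1 := List.length_tail (l := t)
    simp only [List.length_cons]; omega
  · simp only [List.length_cons]; omega

lemma join_nil_eq (out : List (List Char)) : PySem.Chars.join [] out = out.flatten := by
  induction out with
  | nil => simp [PySem.Chars.join_nil]
  | cons a l ih =>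
    cases l with
    | nil => simp [PySem.Chars.join_singleton]
    | cons b m =>
      rw [PySem.Chars.join_cons_cons] at *
      simp_all

lemma prefix_singleton_iff (a : Char) (l : List Char) : [a] <+: l ↔ l.head? = some a := by
  cases l with
  | nil => simp
  | cons b t => simp [List.cons_prefix_cons, eq_comm]

lemma infix_singleton_iff (a : Char) (l : List Char) : [a] <:+: l ↔ a ∈ l := by
  constructor
  · intro h; exact h.mem (by simp)
  · intro h
    obtain ⟨s, t, rfl⟩ := List.append_of_mem h
    exact ⟨s, t, by simp⟩

lemma infix_of_prefix_drop {sub s : List Char} {n : Nat} (h : sub <+: s.drop n) : sub <:+: s := by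
  obtain ⟨t, ht⟩ := h
  exact ⟨s.take n, t, by rw [List.append_assoc, ht, List.take_append_drop]⟩

lemma find_eq_natCast_iff (s sub : List Char) (n : Nat) :
    PySem.Chars.find s sub = (n : Int) ↔ sub <+: s.drop n ∧ ∀ i < n, ¬ sub <+: s.drop i := by
  constructor
  · intro h
    have h0 : (0:Int) ≤ PySem.Chars.find s sub := by rw [h]; positivity
    have hspec := PySem.Chars.find_spec (s := s) (sub := sub) h0
    rw [h] at hspec
    simpa using hspec
  · rintro ⟨hp, hmin⟩
    have hin : sub <:+: s := infix_of_prefix_drop hp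
    have hne : PySem.Chars.find s sub ≠ -1 := (PySem.Chars.find_ne_neg_one_iff s sub).mpr hin
    have h0 : (0:Int) ≤ PySem.Chars.find s sub := by
      have := PySem.Chars.neg_one_le_find s sub
      omega
    have hspec := PySem.Chars.find_spec (s := s) (sub := sub) h0
    set m := (PySem.Chars.find s sub).toNat with hm
    have hfm : PySem.Chars.find s sub = (m : Int) := by omega
    rw [hfm]
    rcases lt_trichotomy m n with h | h | h
    · exact absurd hspec.1 (hmin m h)
    · exact_mod_cast congrArg (Nat.cast (R := Int)) h
    · exact absurd hp (hspec.2 n h)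

lemma find_nil_eq (sub : List Char) (h : sub ≠ []) : PySem.Chars.find [] sub = -1 := by
  rw [PySem.Chars.find_eq_neg_one_iff]
  simp [List.infix_nil, h]

lemma find_zero_of_prefix {s sub : List Char} (h : sub <+: s) : PySem.Chars.find s sub = 0 := by
  have := (find_eq_natCast_iff s sub 0).mpr ⟨by simpa using h, by omega⟩
  simpa using this

lemma find_cons_shift {c : Char} {r sub : List Char} (h : ¬ sub <+: c :: r) :
    PySem.Chars.find (c :: r) sub =
      if PySem.Chars.find r sub = -1 then -1 else 1 + PySem.Chars.find r sub := by
  by_cases hr : PySem.Chars.find r sub = -1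
  · rw [if_pos hr, PySem.Chars.find_eq_neg_one_iff]
    rw [PySem.Chars.find_eq_neg_one_iff] at hr
    intro hin
    rcases List.infix_cons_iff.mp hin with h' | h'
    · exact h h'
    · exact hr h'
  · rw [if_neg hr]
    have h0 : (0:Int) ≤ PySem.Chars.find r sub := by
      have := PySem.Chars.neg_one_le_find r sub
      omega
    set m := (PySem.Chars.find r sub).toNat with hm
    have hfm : PySem.Chars.find r sub = (m : Int) := by omega
    have hch := (find_eq_natCast_iff r sub m).mp hfm
    have : PySem.Chars.find (c :: r) sub = ((m + 1 : Nat) : Int) := by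
      rw [find_eq_natCast_iff]
      constructor
      · simpa using hch.1
      · intro i hi
        cases i with
        | zero => simpa using h
        | succ j => simpa using hch.2 j (by omega)
    rw [this, hfm]
    push_cast
    ring

-- take/drop at the first-space position agree with takeWhile/dropWhile
lemma tw_aux : ∀ (n : Nat) (s : List Char), s[n]? = some ' ' → (∀ i < n, s[i]? ≠ some ' ') →
    s.take n = s.takeWhile (· ≠ ' ') ∧ s.drop n = s.dropWhile (· ≠ ' ') := by
  intro n
  induction n with
  | zero =>
    intro s h _
    cases s with
    | nil => simp at h
    | cons c t =>
      simp at h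
      subst h
      simp [List.takeWhile_cons, List.dropWhile_cons]
  | succ n ih =>
    intro s h hmin
    cases s with
    | nil => simp at h
    | cons c t =>
      have hc : c ≠ ' ' := by
        intro hc
        exact hmin 0 (by omega) (by simp [hc])
      have ht := ih t (by simpa using h) (by intro i hi; have := hmin (i+1) (by omega); simpa using this)
      simp [List.takeWhile_cons, List.dropWhile_cons, hc, ht.1, ht.2]

lemma no_space_tw {s : List Char} (h : ' ' ∉ s) :
    s.takeWhile (· ≠ ' ') = s ∧ s.dropWhile (· ≠ ' ') = [] := by
  constructor
  · rw [List.takeWhile_eq_self_iff]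
    intro x hx; simp; rintro rfl; exact h hx
  · rw [List.dropWhile_eq_nil_iff]
    intro x hx; simp; rintro rfl; exact h hx

lemma tw_append {t : List Char} (r : List Char) (h : ∀ x ∈ t, x ≠ ' ') :
    (t ++ ' ' :: r).takeWhile (· ≠ ' ') = t ∧ (t ++ ' ' :: r).dropWhile (· ≠ ' ') = ' ' :: r := by
  induction t with
  | nil => simp [List.takeWhile_cons, List.dropWhile_cons]
  | cons c t ih =>
    have hc : c ≠ ' ' := h c (by simp)
    have ht := ih (by intro x hx; exact h x (by simp [hx]))
    refine ⟨?_, ?_⟩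
    · rw [List.cons_append, List.takeWhile_cons, if_pos (by simp [hc]), ht.1]
    · rw [List.cons_append, List.dropWhile_cons, if_pos (by simp [hc]), ht.2]

-- replace.go with enough fuel computes pvRepHy
lemma pvRepHy_amp_dash (t : List Char) : pvRepHy ('&' :: '-' :: t) = pvRepHy t := by
  rw [pvRepHy]
  simp

lemma pvRepHy_cons {c : Char} {t : List Char} (h : ¬ (c = '&' ∧ t.head? = some '-')) :
    pvRepHy (c :: t) = c :: pvRepHy t := by
  rw [pvRepHy]
  simp [h]

lemma replace_go_spec : ∀ (fuel : Nat) (l acc : List Char), l.length ≤ fuel →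
    PySem.Chars.replace.go ['&','-'] [] fuel l acc = acc.reverse ++ pvRepHy l := by
  intro fuel
  induction fuel with
  | zero =>
    intro l acc h
    have hl : l = [] := by cases l <;> simp_all
    subst hl
    rw [PySem.Chars.replace.go]
    simp [pvRepHy]
  | succ fuel ih =>
    intro l acc h
    cases l with
    | nil =>
      rw [PySem.Chars.replace.go]
      · simp [pvRepHy]
      · omega
    | cons c t =>
      rw [PySem.Chars.replace.go]
      cases t with
      | nil =>
        rw [if_neg (by simp [List.isPrefixOf])]
        rw [ih [] (c :: acc) (by simp)]
        rw [pvRepHy_cons (by simp)]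
        simp [pvRepHy]
      | cons d t' =>
        by_cases hcd : c = '&' ∧ d = '-'
        · obtain ⟨rfl, rfl⟩ := hcd
          rw [if_pos (by simp [List.isPrefixOf])]
          simp only [List.length_cons] at h
          rw [show List.drop (['&','-'].length) ('&' :: '-' :: t') = t' by simp]
          rw [ih t' ([].reverse ++ acc) (by omega)]
          rw [pvRepHy_amp_dash]
          simp
        · have hcd' : ¬('&' = c ∧ '-' = d) := fun hx => hcd ⟨hx.1.symm, hx.2.symm⟩
          rw [if_neg (by simp [List.isPrefixOf, beq_iff_eq]; tauto)]
          simp only [List.length_cons] at h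
          rw [ih (d :: t') (c :: acc) (by simp; omega)]
          rw [pvRepHy_cons (c := c) (t := d :: t') (by simpa using hcd)]
          simp

lemma replace_eq (l : List Char) : PySem.Chars.replace l ['&','-'] [] = pvRepHy l := by
  have h := replace_go_spec l.length l [] (le_refl _)
  simp only [PySem.Chars.replace]
  rw [if_neg (by simp)]
  simpa using h

-- splitOn.go with enough fuel computes List.splitOn
lemma splitOn_cons (c : Char) (l : List Char) :
    List.splitOn ' ' (c :: l) =
      if c = ' ' then [] :: List.splitOn ' ' l else List.modifyHead (List.cons c) (List.splitOn ' ' l) := by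
  simp [List.splitOn, List.splitOnP_cons]

lemma mh_comp (l : List (List Char)) (f g : List Char → List Char) :
    List.modifyHead f (List.modifyHead g l) = List.modifyHead (fun x => f (g x)) l := by
  cases l <;> simp

lemma splitOn_go_spec : ∀ (fuel : Nat) (l cur : List Char) (acc : List (List Char)), l.length < fuel →
    PySem.Chars.splitOn.go [' '] fuel l cur acc =
      acc.reverse ++ List.modifyHead (cur.reverse ++ ·) (List.splitOn ' ' l) := by
  intro fuel
  induction fuel with
  | zero => intro l cur acc h; omega
  | succ fuel ih =>
    intro l cur acc h
    cases l with
    | nil =>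
      rw [PySem.Chars.splitOn.go]
      · simp [List.splitOn, List.splitOnP_nil]
      · omega
    | cons c t =>
      rw [PySem.Chars.splitOn.go]
      simp only [List.length_cons] at h
      by_cases hc : c = ' '
      · subst hc
        rw [if_pos (by simp [List.isPrefixOf])]
        rw [show List.drop ([' '].length) (' ' :: t) = t by simp]
        rw [ih t [] (cur.reverse :: acc) (by omega)]
        rw [splitOn_cons, if_pos rfl]
        cases hsp : List.splitOn ' ' t with
        | nil =>
          exact absurd hsp (by simp [List.splitOn]; exact List.splitOnP_ne_nil _ _)
        | cons a L => simp
      · have hc' : ¬ ' ' = c := fun h' => hc h'.symm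
        rw [if_neg (by simp [List.isPrefixOf, beq_iff_eq]; exact hc')]
        rw [ih t (c :: cur) acc (by omega)]
        rw [splitOn_cons, if_neg hc, mh_comp]
        cases List.splitOn ' ' t <;> simp

lemma splitOn_eq (cs : List Char) : PySem.Chars.splitOn cs [' '] = List.splitOn ' ' cs := by
  show PySem.Chars.splitOn.go [' '] (cs.length + 1) cs [] [] = _
  rw [splitOn_go_spec (cs.length + 1) cs [] [] (by omega)]
  cases List.splitOn ' ' cs <;> simp

lemma splitOn_no_space {cs : List Char} (h : ' ' ∉ cs) : List.splitOn ' ' cs = [cs] := by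
  induction cs with
  | nil => simp [List.splitOn, List.splitOnP_nil]
  | cons c t ih =>
    have hc : c ≠ ' ' := by rintro rfl; exact h (by simp)
    rw [splitOn_cons, if_neg hc, ih (fun hm => h (by simp [hm]))]
    simp

lemma splitOn_token_append {tok : List Char} (rest : List Char) (h : ∀ x ∈ tok, x ≠ ' ') :
    List.splitOn ' ' (tok ++ ' ' :: rest) = tok :: List.splitOn ' ' rest := by
  induction tok with
  | nil => simp [splitOn_cons]
  | cons c t ih =>
    have hc : c ≠ ' ' := h c (by simp)
    rw [List.cons_append, splitOn_cons, if_neg hc, ih (by intro x hx; exact h x (by simp [hx]))]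
    simp

lemma prefix2_iff (c : Char) (r : List Char) : ['&','='] <+: (c :: r) ↔ c = '&' ∧ r.head? = some '=' := by
  cases r with
  | nil => simp [List.cons_prefix_cons]
  | cons d r' => simp [List.cons_prefix_cons, eq_comm]

lemma head?_take_space {m : Nat} {r : List Char} (h : (r.take m).head? = some '-') : r.head? = some '-' := by
  cases m with
  | zero => simp at h
  | succ m' =>
    cases r with
    | nil => simp at h
    | cons a r' => simpa using h

-- B's token fixer equals A's single-token scan
lemma fixTokB_eq_aux : ∀ (N : Nat) (tok : List Char), tok.length ≤ N → fixTokB tok = fixA tok := by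
  intro N
  induction N with
  | zero =>
    intro tok h
    have hnil : tok = [] := by cases tok <;> simp_all
    subst hnil
    rw [fixA]
    simp only [fixTokB]
    rw [if_pos (find_nil_eq _ (by simp))]
    rw [replace_eq, pvRepHy]
  | succ N ih =>
    intro tok h
    cases tok with
    | nil =>
      rw [fixA]
      simp only [fixTokB]
      rw [if_pos (find_nil_eq _ (by simp))]
      rw [replace_eq, pvRepHy]
    | cons c r =>
      simp only [List.length_cons] at h
      by_cases h1 : c = '&' ∧ r.head? = some '='
      · obtain ⟨rfl, hh⟩ := h1
        obtain ⟨rt, rfl⟩ : ∃ rt, r = '=' :: rt := by cases r <;> simp_all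
        simp only [List.length_cons] at h
        have hf : PySem.Chars.find ('&' :: '=' :: rt) ['&','='] = 0 :=
          find_zero_of_prefix (by simp [List.cons_prefix_cons])
        simp only [fixTokB, hf]
        rw [if_neg (by omega)]
        rw [PySem.List.slice_to _ (by omega), PySem.List.slice_from _ (by omega)]
        rw [show ((0:Int)).toNat = 0 from rfl, show ((0:Int)+2).toNat = 2 from rfl]
        rw [replace_eq]
        conv_rhs => rw [fixA]
        rw [if_pos ⟨rfl, rfl⟩]
        simp [pvRepHy]
      · by_cases h2 : c = '&' ∧ r.head? = some '-'
        · obtain ⟨rfl, hh⟩ := h2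
          obtain ⟨rt, rfl⟩ : ∃ rt, r = '-' :: rt := by cases r <;> simp_all
          simp only [List.length_cons] at h
          have hnp0 : ¬ ['&','='] <+: ('&' :: '-' :: rt) := by rw [prefix2_iff]; simp
          have hnp1 : ¬ ['&','='] <+: ('-' :: rt) := by rw [prefix2_iff]; simp
          have hshift : PySem.Chars.find ('&'::'-'::rt) ['&','='] =
              if PySem.Chars.find rt ['&','='] = -1 then -1
              else 2 + PySem.Chars.find rt ['&','='] := by
            rw [find_cons_shift hnp0, find_cons_shift hnp1]
            by_cases hm : PySem.Chars.find rt ['&','='] = -1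
            · simp [hm]
            · rw [if_neg hm, if_neg (by
                have := PySem.Chars.neg_one_le_find rt ['&','=']
                intro hx
                omega), if_neg hm]
              ring
          have rhs2 : fixA ('&'::'-'::rt) = fixA rt := by
            rw [fixA]
            rw [if_neg (by simp), if_pos ⟨rfl, rfl⟩]
            rfl
          by_cases hm : PySem.Chars.find rt ['&','='] = -1
          · have lhs : fixTokB ('&'::'-'::rt) = pvRepHy rt := by
              simp only [fixTokB, hshift, hm, if_true]
              rw [replace_eq, pvRepHy_amp_dash]
            have rhsr : fixTokB rt = pvRepHy rt := by
              simp only [fixTokB]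
              rw [if_pos hm, replace_eq]
            rw [lhs, rhs2, ← ih rt (by omega), rhsr]
          · have h0 : (0:Int) ≤ PySem.Chars.find rt ['&','='] := by
              have := PySem.Chars.neg_one_le_find rt ['&','=']
              omega
            set m := (PySem.Chars.find rt ['&','=']).toNat with hmdef
            have hfm : PySem.Chars.find rt ['&','='] = (m:Int) := by omega
            have hk : PySem.Chars.find ('&'::'-'::rt) ['&','='] = ((m:Int) + 2) := by
              rw [hshift, if_neg hm, hfm]; ring
            have e1 : PySem.List.slice ('&'::'-'::rt) none (some ((m:Int)+2)) = '&'::'-'::rt.take m := by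
              rw [PySem.List.slice_to _ (by omega)]
              rw [show ((m:Int)+2).toNat = m + 2 from by omega]
              simp [List.take_succ_cons]
            have e2 : PySem.List.slice ('&'::'-'::rt) (some (((m:Int)+2)+2)) none = rt.drop (m+2) := by
              rw [PySem.List.slice_from _ (by omega)]
              rw [show (((m:Int)+2)+2).toNat = (m + 2) + 2 from by omega]
              simp [List.drop_succ_cons]
            have lhs : fixTokB ('&'::'-'::rt) =
                pvRepHy (rt.take m) ++ ['['] ++ PySem.Chars.upper (rt.drop (m+2)) ++ [']'] := by
              simp only [fixTokB, hk]
              rw [if_neg (by omega), e1, e2, replace_eq, pvRepHy_amp_dash]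
            have rhsr : fixTokB rt =
                pvRepHy (rt.take m) ++ ['['] ++ PySem.Chars.upper (rt.drop (m+2)) ++ [']'] := by
              simp only [fixTokB, hfm]
              rw [if_neg (by omega)]
              rw [PySem.List.slice_to _ (by omega), PySem.List.slice_from _ (by omega)]
              rw [show ((m:Int)).toNat = m from by omega, show ((m:Int)+2).toNat = m + 2 from by omega]
              rw [replace_eq]
            rw [lhs, rhs2, ← ih rt (by omega), rhsr]
        · have hnp0 : ¬ ['&','='] <+: (c :: r) := by rw [prefix2_iff]; exact h1
          have hshift := find_cons_shift hnp0
          have rhs2 : fixA (c :: r) = c :: fixA r := by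
            rw [fixA]
            rw [if_neg h1, if_neg h2]
          by_cases hm : PySem.Chars.find r ['&','='] = -1
          · have lhs : fixTokB (c :: r) = pvRepHy (c :: r) := by
              simp only [fixTokB, hshift, hm, if_true]
              rw [replace_eq]
            have rhsr : fixTokB r = pvRepHy r := by
              simp only [fixTokB]
              rw [if_pos hm, replace_eq]
            rw [lhs, rhs2, ← ih r (by omega), rhsr, pvRepHy_cons h2]
          · have h0 : (0:Int) ≤ PySem.Chars.find r ['&','='] := by
              have := PySem.Chars.neg_one_le_find r ['&','=']
              omega
            set m := (PySem.Chars.find r ['&','=']).toNat with hmdef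
            have hfm : PySem.Chars.find r ['&','='] = (m:Int) := by omega
            have hk : PySem.Chars.find (c :: r) ['&','='] = ((m:Int) + 1) := by
              rw [hshift, if_neg hm, hfm]; ring
            have e1 : PySem.List.slice (c :: r) none (some ((m:Int)+1)) = c :: r.take m := by
              rw [PySem.List.slice_to _ (by omega)]
              rw [show ((m:Int)+1).toNat = m + 1 from by omega]
              simp [List.take_succ_cons]
            have e2 : PySem.List.slice (c :: r) (some (((m:Int)+1)+2)) none = r.drop (m+2) := by
              rw [PySem.List.slice_from _ (by omega)]
              rw [show (((m:Int)+1)+2).toNat = (m + 2) + 1 from by omega]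
              simp [List.drop_succ_cons]
            have hrep2 : pvRepHy (c :: r.take m) = c :: pvRepHy (r.take m) := by
              refine pvRepHy_cons ?_
              rintro ⟨rfl, hh⟩
              exact h2 ⟨rfl, head?_take_space hh⟩
            have lhs : fixTokB (c :: r) =
                pvRepHy (c :: r.take m) ++ ['['] ++ PySem.Chars.upper (r.drop (m+2)) ++ [']'] := by
              simp only [fixTokB, hk]
              rw [if_neg (by omega), e1, e2, replace_eq]
            have rhsr : fixTokB r =
                pvRepHy (r.take m) ++ ['['] ++ PySem.Chars.upper (r.drop (m+2)) ++ [']'] := by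
              simp only [fixTokB, hfm]
              rw [if_neg (by omega)]
              rw [PySem.List.slice_to _ (by omega), PySem.List.slice_from _ (by omega)]
              rw [show ((m:Int)).toNat = m from by omega, show ((m:Int)+2).toNat = m + 2 from by omega]
              rw [replace_eq]
            rw [lhs, rhs2, ← ih r (by omega), rhsr, hrep2]
            simp

lemma fixTokB_eq (tok : List Char) : fixTokB tok = fixA tok :=
  fixTokB_eq_aux tok.length tok le_rfl

-- A's scan over a space-free token (and over token ++ " " ++ rest)
lemma procA_space (rest : List Char) : procA (' ' :: rest) = ' ' :: procA rest := by
  rw [procA]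
  rw [if_neg (by simp), if_neg (by simp)]

lemma procA_token_aux : ∀ (N : Nat) (tok : List Char), tok.length ≤ N → (∀ x ∈ tok, x ≠ ' ') →
    procA tok = fixA tok := by
  intro N
  induction N with
  | zero =>
    intro tok hl _
    have hnil : tok = [] := by cases tok <;> simp_all
    subst hnil
    rw [procA, fixA]
  | succ N ih =>
    intro tok hl hsp
    cases tok with
    | nil => rw [procA, fixA]
    | cons c r =>
      simp only [List.length_cons] at hl
      by_cases h1 : c = '&' ∧ r.head? = some '='
      · obtain ⟨rfl, hh⟩ := h1
        obtain ⟨rt, rfl⟩ : ∃ rt, r = '=' :: rt := by cases r <;> simp_all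
        simp only [List.length_cons] at hl
        have hnos : ' ' ∉ rt := by
          intro hx
          exact hsp ' ' (by simp [hx]) rfl
        rw [procA]
        conv_rhs => rw [fixA]
        rw [if_pos ⟨rfl, rfl⟩, if_pos ⟨rfl, rfl⟩]
        simp only [List.tail_cons]
        rw [(no_space_tw hnos).1, (no_space_tw hnos).2, procA]
      · by_cases h2 : c = '&' ∧ r.head? = some '-'
        · obtain ⟨rfl, hh⟩ := h2
          obtain ⟨rt, rfl⟩ : ∃ rt, r = '-' :: rt := by cases r <;> simp_all
          simp only [List.length_cons] at hl
          rw [procA]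
          conv_rhs => rw [fixA]
          rw [if_neg (by simp), if_pos ⟨rfl, rfl⟩, if_neg (by simp), if_pos ⟨rfl, rfl⟩]
          simp only [List.tail_cons]
          exact ih rt (by omega) (fun x hx => hsp x (by simp [hx]))
        · rw [procA]
          rw [if_neg h1, if_neg h2]
          conv_rhs => rw [fixA]
          rw [if_neg h1, if_neg h2]
          exact congrArg _ (ih r (by omega) (fun x hx => hsp x (by simp [hx])))

lemma procA_token (tok : List Char) (h : ∀ x ∈ tok, x ≠ ' ') : procA tok = fixA tok :=
  procA_token_aux tok.length tok le_rfl h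

lemma procA_append_aux : ∀ (N : Nat) (tok rest : List Char), tok.length ≤ N →
    (∀ x ∈ tok, x ≠ ' ') → procA (tok ++ ' ' :: rest) = fixA tok ++ ' ' :: procA rest := by
  intro N
  induction N with
  | zero =>
    intro tok rest hl _
    have hnil : tok = [] := by cases tok <;> simp_all
    subst hnil
    simp only [List.nil_append]
    rw [procA_space, fixA]
    simp
  | succ N ih =>
    intro tok rest hl hsp
    cases tok with
    | nil =>
      simp only [List.nil_append]
      rw [procA_space, fixA]
      simp
    | cons c r =>
      simp only [List.length_cons] at hl
      cases r with
      | nil =>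
        simp only [List.cons_append, List.nil_append]
        rw [procA]
        rw [if_neg (by simp), if_neg (by simp)]
        rw [procA_space]
        conv_rhs => rw [fixA]
        rw [if_neg (by simp), if_neg (by simp), fixA]
        simp
      | cons d rt =>
        simp only [List.length_cons] at hl
        simp only [List.cons_append]
        by_cases h1 : c = '&' ∧ d = '='
        · obtain ⟨rfl, rfl⟩ := h1
          have hrt : ∀ x ∈ rt, x ≠ ' ' := fun x hx => hsp x (by simp [hx])
          rw [procA]
          rw [if_pos ⟨rfl, rfl⟩]
          simp only [List.tail_cons]
          rw [(tw_append rest hrt).1, (tw_append rest hrt).2, procA_space]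
          conv_rhs => rw [fixA]
          rw [if_pos ⟨rfl, rfl⟩]
          simp
        · by_cases h2 : c = '&' ∧ d = '-'
          · obtain ⟨rfl, rfl⟩ := h2
            rw [procA]
            rw [if_neg (by simp), if_pos ⟨rfl, rfl⟩]
            simp only [List.tail_cons]
            have hih := ih rt rest (by omega) (fun x hx => hsp x (by simp [hx]))
            rw [hih]
            conv_rhs => rw [fixA]
            rw [if_neg (by simp), if_pos ⟨rfl, rfl⟩]
            rfl
          · rw [procA]
            rw [if_neg (by simpa using h1), if_neg (by simpa using h2)]
            have hih := ih (d :: rt) rest (by simp only [List.length_cons]; omega)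
              (fun x hx => hsp x (by simp [hx]))
            simp only [List.cons_append] at hih
            rw [hih]
            conv_rhs => rw [fixA]
            rw [if_neg (by simpa using h1), if_neg (by simpa using h2)]
            simp

lemma procA_append (tok rest : List Char) (h : ∀ x ∈ tok, x ≠ ' ') :
    procA (tok ++ ' ' :: rest) = fixA tok ++ ' ' :: procA rest :=
  procA_append_aux tok.length tok rest le_rfl h

lemma dropWhile_head_space : ∀ (l : List Char) {d : Char} {rest : List Char},
    l.dropWhile (· ≠ ' ') = d :: rest → d = ' ' := by
  intro l
  induction l with
  | nil => intro d rest h; simp at h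
  | cons c t ih =>
    intro d rest h
    rw [List.dropWhile_cons] at h
    by_cases hc : c = ' '
    · rw [if_neg (by simp [hc])] at h
      rw [List.cons.injEq] at h
      rw [← h.1, hc]
    · rw [if_pos (by simp [hc])] at h
      exact ih h

-- B's whole pipeline equals A's scan
lemma procA_eq_B_aux : ∀ (N : Nat) (cs : List Char), cs.length ≤ N →
    procA cs = PySem.Chars.join [' '] ((PySem.Chars.splitOn cs [' ']).map fixTokB) := by
  intro N
  induction N with
  | zero =>
    intro cs h
    have hnil : cs = [] := by cases cs <;> simp_all
    subst hnil
    rw [splitOn_eq]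
    rw [show List.splitOn ' ' ([] : List Char) = [[]] from by simp [List.splitOn, List.splitOnP_nil]]
    simp only [List.map_cons, List.map_nil]
    rw [PySem.Chars.join_singleton, fixTokB_eq, procA, fixA]
  | succ N ih =>
    intro cs h
    rw [splitOn_eq]
    by_cases hs : ' ' ∈ cs
    · have hne : cs.dropWhile (· ≠ ' ') ≠ [] := by
        intro hnil
        rw [List.dropWhile_eq_nil_iff] at hnil
        have := hnil ' ' hs
        simp at this
      obtain ⟨d, rest, hd⟩ : ∃ d rest, cs.dropWhile (· ≠ ' ') = d :: rest := by
        cases hdd : cs.dropWhile (· ≠ ' ') with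
        | nil => exact absurd hdd hne
        | cons a b => exact ⟨a, b, rfl⟩
      have hdsp : d = ' ' := dropWhile_head_space cs hd
      subst hdsp
      have htok : ∀ x ∈ cs.takeWhile (· ≠ ' '), x ≠ ' ' := by
        intro x hx
        have := List.mem_takeWhile_imp hx
        simpa using this
      have hcs : cs = cs.takeWhile (· ≠ ' ') ++ ' ' :: rest := by
        conv_lhs => rw [← List.takeWhile_append_dropWhile (p := fun x => decide (x ≠ ' ')) (l := cs)]
        rw [hd]
      have hlen : rest.length ≤ N := by
        have hlc := congrArg List.length hcs
        simp only [List.length_append, List.length_cons] at hlc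
        omega
      conv_lhs => rw [hcs]
      conv_rhs => rw [hcs]
      rw [splitOn_token_append rest htok]
      rcases hsp2 : List.splitOn ' ' rest with _ | ⟨a, L⟩
      · exact absurd hsp2 (by simp [List.splitOn]; exact List.splitOnP_ne_nil _ _)
      · simp only [List.map_cons]
        rw [PySem.Chars.join_cons_cons, fixTokB_eq]
        have ihr := ih rest hlen
        rw [splitOn_eq, hsp2] at ihr
        simp only [List.map_cons] at ihr
        rw [procA_append _ rest htok, ihr]
        simp
    · rw [splitOn_no_space hs]
      simp only [List.map_cons, List.map_nil]
      rw [PySem.Chars.join_singleton, fixTokB_eq]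
      exact procA_token cs (by intro x hx; rintro rfl; exact hs hx)

lemma procA_eq_B (cs : List Char) :
    procA cs = PySem.Chars.join [' '] ((PySem.Chars.splitOn cs [' ']).map fixTokB) :=
  procA_eq_B_aux cs.length cs le_rfl

-- A's loop computes procA
lemma tw_cons2 (a b : Char) (ha : a ≠ ' ') (hb : b ≠ ' ') (l : List Char) :
    (a :: b :: l).takeWhile (· ≠ ' ') = a :: b :: l.takeWhile (· ≠ ' ') ∧
    (a :: b :: l).dropWhile (· ≠ ' ') = l.dropWhile (· ≠ ' ') := by
  constructor <;> simp [List.takeWhile_cons, List.dropWhile_cons, ha, hb]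

lemma loopA_spec (cs : List Char) : ∀ (fuel i : Nat) (out : List (List Char)),
    cs.length - i ≤ fuel →
    (cleanLoopA cs fuel i out).flatten = out.flatten ++ procA (cs.drop i) := by
  intro fuel
  induction fuel with
  | zero =>
    intro i out h
    rw [cleanLoopA, List.drop_eq_nil_iff.mpr (by omega), procA]
    simp
  | succ fuel ih =>
    intro i out h
    by_cases hi : i < cs.length
    · have hdrop : cs.drop i = cs[i] :: cs.drop (i+1) := List.drop_eq_getElem_cons hi
      have hnext : cs[i+1]? = (cs.drop (i+1)).head? := List.head?_drop.symm
      rw [cleanLoopA]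
      rw [dif_pos hi]
      by_cases h1 : cs[i] = '&' ∧ cs[i+1]? = some '='
      · rw [if_pos h1]
        dsimp only
        have hh2 : (cs.drop (i+1)).head? = some '=' := by rw [← hnext]; exact h1.2
        obtain ⟨rt, hrt⟩ : ∃ rt, cs.drop (i+1) = '=' :: rt := by
          cases hdd : cs.drop (i+1) with
          | nil => rw [hdd] at hh2; simp at hh2
          | cons a b =>
            rw [hdd] at hh2
            simp only [List.head?_cons, Option.some.injEq] at hh2
            exact ⟨b, by rw [hh2]⟩
        have hs0 : cs.drop i = '&' :: '=' :: rt := by rw [hdrop, h1.1, hrt]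
        have hdd2 : cs.drop (i+2) = rt := by
          have h' := congrArg (List.drop 1) hrt
          rw [List.drop_drop] at h'
          exact h'
        rw [PySem.Chars.findFrom_natCast cs [' '] i (le_of_lt hi)]
        by_cases hf : PySem.Chars.find (cs.drop i) [' '] = -1
        · rw [if_pos hf]
          rw [if_pos rfl]
          have hnos : ' ' ∉ rt := by
            rw [PySem.Chars.find_eq_neg_one_iff] at hf
            intro hx
            exact hf ((infix_singleton_iff ' ' (cs.drop i)).mpr (by rw [hs0]; simp [hx]))
          have htag : PySem.List.slice cs (some ((i:Int)+2)) (some (cs.length:Int)) = rt := by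
            rw [show ((i:Int)+2) = (((i+2:Nat)):Int) from by push_cast; ring]
            rw [show ((cs.length:Nat):Int) = (((cs.length:Nat)):Int) from rfl]
            rw [PySem.List.slice_natCast]
            rw [hdd2]
            apply List.take_of_length_le
            have hlen := congrArg List.length hdd2
            rw [List.length_drop] at hlen
            omega
          rw [htag]
          rw [ih cs.length _ (by omega)]
          rw [List.drop_length]
          conv_rhs => rw [hs0, procA]
          rw [if_pos ⟨rfl, rfl⟩]
          simp only [List.tail_cons]
          rw [(no_space_tw hnos).1, (no_space_tw hnos).2, procA]
          simp [List.flatten_append]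
        · rw [if_neg hf]
          obtain ⟨n, hfn⟩ : ∃ n : Nat, PySem.Chars.find (cs.drop i) [' '] = (n:Int) :=
            ⟨(PySem.Chars.find (cs.drop i) [' ']).toNat, by
              have := PySem.Chars.neg_one_le_find (cs.drop i) [' ']
              omega⟩
          rw [hfn]
          rw [if_neg (by omega)]
          have hjt : ((i:Int) + (n:Int)).toNat = i + n := by omega
          rw [hjt]
          have hch := (find_eq_natCast_iff (cs.drop i) [' '] n).mp hfn
          have hsn : (cs.drop i)[n]? = some ' ' := by
            have h' := hch.1
            rw [prefix_singleton_iff, List.head?_drop] at h'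
            exact h'
          have hmin : ∀ k, k < n → (cs.drop i)[k]? ≠ some ' ' := by
            intro k hk hk2
            exact hch.2 k hk (by rw [prefix_singleton_iff, List.head?_drop]; exact hk2)
          have hn2 : 2 ≤ n := by
            rcases Nat.lt_or_ge n 2 with hlt | hge
            · exfalso
              interval_cases n
              · rw [hs0] at hsn; simp at hsn
              · rw [hs0] at hsn; simp at hsn
            · exact hge
          obtain ⟨m, rfl⟩ : ∃ m, n = m + 2 := ⟨n - 2, by omega⟩
          have htd := tw_aux (m+2) (cs.drop i) hsn hmin
          have hT : rt.takeWhile (· ≠ ' ') = rt.take m := by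
            have h' := htd.1
            rw [hs0, (tw_cons2 '&' '=' (by decide) (by decide) rt).1] at h'
            rw [show (m+2 : Nat) = (m+1)+1 from rfl, List.take_succ_cons, List.take_succ_cons] at h'
            injection h' with _ h''
            injection h'' with _ h'''
            exact h'''.symm
          have hD : rt.dropWhile (· ≠ ' ') = rt.drop m := by
            have h' := htd.2
            rw [hs0, (tw_cons2 '&' '=' (by decide) (by decide) rt).2] at h'
            rw [show (m+2 : Nat) = (m+1)+1 from rfl, List.drop_succ_cons, List.drop_succ_cons] at h'
            exact h'.symm
          have hdj : cs.drop (i + (m+2)) = rt.drop m := by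
            have h' := congrArg (List.drop (m+2)) hs0
            rw [List.drop_drop] at h'
            rw [show (m+2 : Nat) = (m+1)+1 from rfl, List.drop_succ_cons, List.drop_succ_cons] at h'
            exact h'
          have htag : PySem.List.slice cs (some ((i:Int)+2)) (some ((i+(m+2) : Nat) : Int)) = rt.take m := by
            rw [show ((i:Int)+2) = (((i+2:Nat)):Int) from by push_cast; ring]
            rw [PySem.List.slice_natCast]
            rw [hdd2]
            rw [show (i+(m+2)) - (i+2) = m from by omega]
          rw [htag]
          rw [ih (i + (m+2)) _ (by omega)]
          rw [hdj]
          conv_rhs => rw [hs0, procA]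
          rw [if_pos ⟨rfl, rfl⟩]
          simp only [List.tail_cons]
          rw [hT, hD]
          simp [List.flatten_append]
      · rw [if_neg h1]
        by_cases h2 : cs[i] = '&' ∧ cs[i+1]? = some '-'
        · rw [if_pos h2]
          have hh2 : (cs.drop (i+1)).head? = some '-' := by rw [← hnext]; exact h2.2
          obtain ⟨rt, hrt⟩ : ∃ rt, cs.drop (i+1) = '-' :: rt := by
            cases hdd : cs.drop (i+1) with
            | nil => rw [hdd] at hh2; simp at hh2
            | cons a b =>
              rw [hdd] at hh2
              simp only [List.head?_cons, Option.some.injEq] at hh2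
              exact ⟨b, by rw [hh2]⟩
          have hs0 : cs.drop i = '&' :: '-' :: rt := by rw [hdrop, h2.1, hrt]
          have hdd2 : cs.drop (i+2) = rt := by
            have h' := congrArg (List.drop 1) hrt
            rw [List.drop_drop] at h'
            exact h'
          rw [ih (i+2) out (by omega), hdd2]
          conv_rhs => rw [hs0, procA]
          rw [if_neg (by simp), if_pos ⟨rfl, rfl⟩]
          simp only [List.tail_cons]
        · rw [if_neg h2]
          rw [ih (i+1) _ (by omega)]
          have h1' : ¬ (cs[i] = '&' ∧ (cs.drop (i+1)).head? = some '=') := by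
            rw [← hnext]; exact h1
          have h2' : ¬ (cs[i] = '&' ∧ (cs.drop (i+1)).head? = some '-') := by
            rw [← hnext]; exact h2
          conv_rhs => rw [hdrop, procA]
          rw [if_neg h1', if_neg h2']
          simp [List.flatten_append]
    · rw [cleanLoopA]
      rw [dif_neg hi]
      rw [List.drop_eq_nil_iff.mpr (by omega), procA]
      simp
-- ===== VERDICT (by name: the statement is the Claim_ definition above) =====
theorem clean_utterance_spec : Claim_equal_clean_utterance := by
  intro u _hd
  unfold Spec_clean_utterance clean_utterance clean_utterance_alt
  congr 1
  rw [join_nil_eq, loopA_spec u.toList u.toList.length 0 [] (by omega)]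
  simp only [List.flatten_nil, List.nil_append, List.drop_zero]
  rw [procA_eq_B]
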